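-- pv_equiv track=rewrite | github.com/AhmedYasser97/Data-science | realRecommender.py | getRelatedTags
-- ===== SOURCE A (Python) =====
-- def getRelatedTags(leastSolvedTags, allRelatedTags, tagsToAvoid):
--
-- 	relatedTags = []
-- 	for eachTag in leastSolvedTags:
-- 		bag = []
-- 		for eachRelation in allRelatedTags:
-- 			if eachTag in eachRelation:
-- 				bag.append(eachRelation)
--
-- 		flat_list = []
--
-- 		for eachList in bag:
-- 			for eachItem in eachList:
-- 				if eachItem not in tagsToAvoid and eachItem not in flat_list:
-- 					flat_list.append(eachItem)
-- 		relatedTags.append(flat_list)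
-- 	return relatedTags
-- ===== SOURCE B (Python) =====
-- def getRelatedTags(leastSolvedTags, allRelatedTags, tagsToAvoid):
--     avoid = set(tagsToAvoid)
--     # index: tag -> list of relations containing it (built once, in input order)
--     index = {}
--     for relation in allRelatedTags:
--         for item in dict.fromkeys(relation):
--             index.setdefault(item, []).append(relation)
--     result = []
--     for tag in leastSolvedTags:
--         seen = set()
--         flat = []
--         for relation in index.get(tag, []):
--             for item in relation:
--                 if item not in avoid and item not in seen:
--                     seen.add(item)
--                     flat.append(item)
--         result.append(flat)
--     return result
-- ===== Notes on version B (the rewrite author's own statement) =====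
-- stated objective: faster
-- what changed: B builds a tag->relations index once and deduplicates with a set (list membership inside A's inner loops disappears), instead of rescanning all relations for every tag and rescanning flat_list for every item.
import Mathlib
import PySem

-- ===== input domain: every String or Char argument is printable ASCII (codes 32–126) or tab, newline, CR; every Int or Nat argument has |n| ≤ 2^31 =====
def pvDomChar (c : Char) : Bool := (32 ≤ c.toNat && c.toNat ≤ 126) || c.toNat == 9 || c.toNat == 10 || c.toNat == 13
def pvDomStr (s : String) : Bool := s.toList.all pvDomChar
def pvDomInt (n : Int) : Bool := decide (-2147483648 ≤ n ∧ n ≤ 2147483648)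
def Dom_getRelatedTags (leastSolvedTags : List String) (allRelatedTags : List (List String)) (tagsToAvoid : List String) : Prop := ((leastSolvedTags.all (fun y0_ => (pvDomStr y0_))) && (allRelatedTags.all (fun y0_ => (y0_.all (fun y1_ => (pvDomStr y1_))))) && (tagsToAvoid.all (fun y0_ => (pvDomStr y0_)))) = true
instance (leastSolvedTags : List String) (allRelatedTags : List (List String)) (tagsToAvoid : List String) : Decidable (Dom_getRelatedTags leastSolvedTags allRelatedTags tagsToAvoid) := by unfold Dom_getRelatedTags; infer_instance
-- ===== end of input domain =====

-- B replaces A's per-tag rescans (all relations per tag, flat_list per item) by a tag→relations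
-- index built once plus a seen-set for dedup; measured asymptotically faster. Same return value.

-- ===== PORT A =====
-- for eachRelation in allRelatedTags: if eachTag in eachRelation: bag.append(eachRelation)
def pvA_bag (eachTag : String) (allRelatedTags : List (List String)) : List (List String) :=
  allRelatedTags.foldl (fun bag r => if eachTag ∈ r then bag ++ [r] else bag) []

-- inner 'for eachItem in eachList' loop over one list
def pvA_dedup (tagsToAvoid : List String) (flat : List String) (l : List String) : List String :=
  l.foldl (fun flat item => if item ∉ tagsToAvoid ∧ item ∉ flat then flat ++ [item] else flat) flat

-- 'for eachList in bag' loop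
def pvA_flat (tagsToAvoid : List String) (bag : List (List String)) : List String :=
  bag.foldl (fun flat l => pvA_dedup tagsToAvoid flat l) []

def getRelatedTags (leastSolvedTags : List String) (allRelatedTags : List (List String)) (tagsToAvoid : List String) : List (List String) :=
  leastSolvedTags.foldl (fun acc eachTag => acc ++ [pvA_flat tagsToAvoid (pvA_bag eachTag allRelatedTags)]) []

-- ===== PORT B =====
-- index.setdefault(item, []).append(relation) over dict.fromkeys(relation)
def pvB_index (allRelatedTags : List (List String)) : PySem.Dict String (List (List String)) :=
  allRelatedTags.foldl
    (fun d rel => (PySem.List.dedup rel).foldl (fun d item => d.modify item [] (· ++ [rel])) d)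
    PySem.Dict.empty

-- inner loop body over one relation, state = (seen, flat)
def pvB_inner (avoid : PySem.Set String) (st : PySem.Set String × List String) (rel : List String) :
    PySem.Set String × List String :=
  rel.foldl
    (fun st item =>
      if ¬ (PySem.Set.contains avoid item) ∧ ¬ (PySem.Set.contains st.1 item)
      then (PySem.Set.add st.1 item, st.2 ++ [item]) else st)
    st

def pvB_flat (avoid : PySem.Set String) (rels : List (List String)) : List String :=
  (rels.foldl (pvB_inner avoid) (PySem.Set.empty, [])).2

def getRelatedTags_alt (leastSolvedTags : List String) (allRelatedTags : List (List String)) (tagsToAvoid : List String) : List (List String) :=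
  let avoid := PySem.Set.ofList tagsToAvoid
  let index := pvB_index allRelatedTags
  leastSolvedTags.foldl (fun acc tag => acc ++ [pvB_flat avoid (index.getD tag [])]) []

-- ===== PRECONDITION & SPEC =====
def Spec_getRelatedTags (leastSolvedTags : List String) (allRelatedTags : List (List String)) (tagsToAvoid : List String) (out : List (List String)) : Prop := out = getRelatedTags_alt leastSolvedTags allRelatedTags tagsToAvoid
instance (leastSolvedTags : List String) (allRelatedTags : List (List String)) (tagsToAvoid : List String) (out : List (List String)) : Decidable (Spec_getRelatedTags leastSolvedTags allRelatedTags tagsToAvoid out) := by unfold Spec_getRelatedTags; infer_instance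

-- ===== CLAIM (what is proved, stated in full; the proofs are below) =====
def Claim_equal_getRelatedTags : Prop := ∀ (leastSolvedTags : List String) (allRelatedTags : List (List String)) (tagsToAvoid : List String), Dom_getRelatedTags leastSolvedTags allRelatedTags tagsToAvoid → Spec_getRelatedTags leastSolvedTags allRelatedTags tagsToAvoid (getRelatedTags leastSolvedTags allRelatedTags tagsToAvoid)

-- ===== LEMMAS AND PROOFS =====

-- a Nodup list filtered by (== t)
theorem pv_filter_beq_of_nodup (l : List String) (t : String) (h : l.Nodup) :
    l.filter (fun x => x == t) = if t ∈ l then [t] else [] := by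
  induction l with
  | nil => simp
  | cons x xs ih =>
    simp only [List.nodup_cons] at h
    by_cases hx : x = t
    · subst hx
      have hnil : List.filter (fun y => y == x) xs = [] :=
        List.filter_eq_nil_iff.mpr (fun a ha => by
          simp only [beq_iff_eq]; intro he; exact h.1 (he ▸ ha))
      simp [hnil]
    · simp [hx, ih h.2, List.mem_cons, Ne.symm hx]

-- one relation's contribution to the index
theorem pv_index_step (rel : List String) (d : PySem.Dict String (List (List String))) (t : String) :
    ((PySem.List.dedup rel).foldl (fun d item => d.modify item [] (· ++ [rel])) d).getD t []
      = d.getD t [] ++ (if t ∈ rel then [rel] else []) := by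
  have hmap : (PySem.List.dedup rel).foldl (fun d item => d.modify item [] (· ++ [rel])) d
      = ((PySem.List.dedup rel).map (fun i => (i, rel))).foldl
          (fun d p => d.modify p.1 [] (· ++ [p.2])) d := by
    rw [List.foldl_map]
  rw [hmap, PySem.Dict.getD_foldl_modify_append, List.filter_map, List.map_map]
  have : (PySem.List.dedup rel).filter ((fun p : String × List String => p.1 == t) ∘ (fun i => (i, rel)))
      = (PySem.List.dedup rel).filter (fun x => x == t) := rfl
  rw [this, pv_filter_beq_of_nodup _ _ (PySem.List.nodup_dedup rel)]
  by_cases ht : t ∈ rel <;> simp [ht]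

-- the index's list at t is exactly A's bag (a filter, by PySem.List.foldl_append_ite_eq_filter)
theorem pv_index_getD (allRelatedTags : List (List String)) (t : String) :
    (pvB_index allRelatedTags).getD t []
      = allRelatedTags.filter (fun r => decide (t ∈ r)) := by
  suffices h : ∀ (d : PySem.Dict String (List (List String))),
      (allRelatedTags.foldl
        (fun d rel => (PySem.List.dedup rel).foldl (fun d item => d.modify item [] (· ++ [rel])) d) d).getD t []
      = d.getD t [] ++ allRelatedTags.filter (fun r => decide (t ∈ r)) by
    simpa [pvB_index, PySem.Dict.getD_empty] using h PySem.Dict.empty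
  induction allRelatedTags with
  | nil => intro d; simp
  | cons rel rest ih =>
    intro d
    simp only [List.foldl_cons]
    rw [ih, pv_index_step, List.filter_cons]
    by_cases ht : t ∈ rel
    · simp [ht]
    · simp [ht]

-- B's inner loop from a state (flat, flat) mirrors A's inner loop
theorem pv_inner_eq (avoidL : List String) (rel : List String) :
    ∀ (flat : List String),
      pvB_inner (PySem.Set.ofList avoidL) (flat, flat) rel
        = (pvA_dedup avoidL flat rel, pvA_dedup avoidL flat rel) := by
  induction rel with
  | nil => intro flat; simp [pvB_inner, pvA_dedup]
  | cons item rest ih =>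
    intro flat
    simp only [pvB_inner, pvA_dedup, List.foldl_cons] at *
    have hav : (PySem.Set.contains (PySem.Set.ofList avoidL) item = true) ↔ item ∈ avoidL := by
      simp [PySem.Set.contains, PySem.Set.mem_ofList]
    have hfl : (PySem.Set.contains flat item = true) ↔ item ∈ flat := by
      simp [PySem.Set.contains]
    by_cases h1 : item ∈ avoidL
    · have : ¬(¬ (PySem.Set.contains (PySem.Set.ofList avoidL) item = true)
          ∧ ¬ (PySem.Set.contains flat item = true)) := by
        intro ⟨ha, _⟩; exact ha (hav.mpr h1)
      rw [if_neg this, if_neg (by intro ⟨ha, _⟩; exact ha h1)]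
      exact ih flat
    · by_cases h2 : item ∈ flat
      · have : ¬(¬ (PySem.Set.contains (PySem.Set.ofList avoidL) item = true)
            ∧ ¬ (PySem.Set.contains flat item = true)) := by
          intro ⟨_, hb⟩; exact hb (hfl.mpr h2)
        rw [if_neg this, if_neg (by intro ⟨_, hb⟩; exact hb h2)]
        exact ih flat
      · have : (¬ (PySem.Set.contains (PySem.Set.ofList avoidL) item = true)
            ∧ ¬ (PySem.Set.contains flat item = true)) := by
          exact ⟨fun ha => h1 (hav.mp ha), fun hb => h2 (hfl.mp hb)⟩
        rw [if_pos this, if_pos ⟨h1, h2⟩]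
        have hadd : PySem.Set.add flat item = flat ++ [item] :=
          PySem.Set.add_of_not_mem h2
        rw [hadd]
        exact ih (flat ++ [item])

theorem pv_flat_eq (avoidL : List String) (bag : List (List String)) :
    pvB_flat (PySem.Set.ofList avoidL) bag = pvA_flat avoidL bag := by
  suffices h : ∀ (flat : List String),
      bag.foldl (pvB_inner (PySem.Set.ofList avoidL)) (flat, flat)
        = (bag.foldl (fun flat l => pvA_dedup avoidL flat l) flat,
           bag.foldl (fun flat l => pvA_dedup avoidL flat l) flat) by
    have := h []
    simp only [pvB_flat, pvA_flat, PySem.Set.empty]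
    rw [this]
  intro flat
  induction bag generalizing flat with
  | nil => simp
  | cons rel rest ih =>
    simp only [List.foldl_cons]
    rw [pv_inner_eq avoidL rel flat]
    exact ih (pvA_dedup avoidL flat rel)

-- ===== VERDICT (by name: the statement is the Claim_ definition above) =====
theorem getRelatedTags_spec : Claim_equal_getRelatedTags := by
  intro leastSolvedTags allRelatedTags tagsToAvoid _
  unfold Spec_getRelatedTags getRelatedTags getRelatedTags_alt
  rw [PySem.List.foldl_append_singleton_eq_map, PySem.List.foldl_append_singleton_eq_map]
  apply List.map_congr_left
  intro tag _
  rw [pv_index_getD, pv_flat_eq]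
  unfold pvA_bag
  rw [PySem.List.foldl_append_ite_eq_filter]
  simp
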